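-- pv_equiv track=rewrite | github.com/joshanashakya/dissertation | workspace/dataset/java-python/GeeksForGeeks/415/A/2.py | number_of_subsequences
-- ===== SOURCE A (Python) =====
-- def fact(n):
--     res = 1
--     for i in range(2, n + 1):
--         res = res * i
--     return res
--
-- def nCr(n, r):
--     return fact(n) // (fact(r) * fact(n - r))
--
-- def number_of_subsequences(arr, k, n):
--
--     s = 0
--
--     # Map to store the frequencies
--     # of each elements
--     m = dict()
--
--     # Loop to store the
--     # frequencies of elements
--     # in the map
--     for i in arr:
--         m[i] = m.get(i, 0) + 1
--
--     for j in m: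
--
--         # Using nCR formula to
--         # calculate the number
--         # of subsequences of a
--         # given length
--         s = s + nCr(m[j], k)
--
--     return s
-- ===== SOURCE B (Python) =====
-- def fact(n):
--     res = 1
--     for i in range(2, n + 1):
--         res = res * i
--     return res
--
-- def nCr(n, r):
--     return fact(n) // (fact(r) * fact(n - r))
--
-- def number_of_subsequences(arr, k, n):
--     # sort, then walk consecutive equal runs instead of building a dict
--     def go(xs):
--         if not xs:
--             return 0
--         x = xs[0]
--         i = 1
--         while i < len(xs) and xs[i] == x:
--             i += 1
--         return nCr(i, k) + go(xs[i:])
--     return go(sorted(arr))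
-- ===== Notes on version B (the rewrite author's own statement) =====
-- stated objective: alternative
-- what changed: Frequency gathering by dict insertion + key iteration is replaced by sorting the input and recursively walking consecutive equal runs, adding nCr(run length, k) per run; the fact/nCr helpers are kept verbatim.
import Mathlib
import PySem

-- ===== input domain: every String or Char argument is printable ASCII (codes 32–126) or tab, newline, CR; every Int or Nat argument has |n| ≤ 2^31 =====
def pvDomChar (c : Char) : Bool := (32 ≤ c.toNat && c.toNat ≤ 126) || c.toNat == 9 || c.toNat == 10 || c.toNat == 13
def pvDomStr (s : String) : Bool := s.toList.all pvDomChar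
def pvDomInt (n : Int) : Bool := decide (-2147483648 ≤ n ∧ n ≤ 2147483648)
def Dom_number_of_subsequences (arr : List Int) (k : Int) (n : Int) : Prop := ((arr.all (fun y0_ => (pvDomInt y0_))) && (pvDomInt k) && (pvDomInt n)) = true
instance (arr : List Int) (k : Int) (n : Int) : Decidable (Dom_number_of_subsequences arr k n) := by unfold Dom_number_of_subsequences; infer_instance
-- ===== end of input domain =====

-- B replaces A's frequency dict with a sorted pass over consecutive equal runs; objective: alternative decomposition (no speed claim).

-- ===== PORT A =====
def fact (n : Int) : Int :=
  (PySem.List.pyRange 2 (n + 1) 1).foldl (fun res i => res * i) 1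

def nCr (n r : Int) : Int :=
  PySem.Int.floordiv (fact n) (fact r * fact (n - r))

def number_of_subsequences (arr : List Int) (k : Int) (n : Int) : Int :=
  let m : PySem.Dict Int Int :=
    arr.foldl (fun d i => d.insert i (d.getD i 0 + 1)) PySem.Dict.empty
  m.keys.foldl (fun s j => s + nCr (m.getD j 0) k) 0

-- ===== PORT B =====
-- go(xs): i = length of the run of xs[0] (1 + equal prefix of the tail);
-- return nCr(i, k) + go(xs[i:]).
def goRuns (k : Int) : List Int → Int
  | [] => 0
  | x :: xs =>
      nCr (1 + ((xs.takeWhile (fun y => y == x)).length : Int)) k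
        + goRuns k (xs.dropWhile (fun y => y == x))
  termination_by l => l.length
  decreasing_by
    simpa using Nat.lt_succ_of_le (List.length_dropWhile_le _ _)

def number_of_subsequences_alt (arr : List Int) (k : Int) (n : Int) : Int :=
  goRuns k (PySem.List.sorted arr (fun x => x) false)

-- ===== PRECONDITION & SPEC =====
def Spec_number_of_subsequences (arr : List Int) (k : Int) (n : Int) (out : Int) : Prop := out = number_of_subsequences_alt arr k n
instance (arr : List Int) (k : Int) (n : Int) (out : Int) : Decidable (Spec_number_of_subsequences arr k n out) := by unfold Spec_number_of_subsequences; infer_instance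

-- ===== CLAIM (what is proved, stated in full; the proofs are below) =====
def Claim_equal_number_of_subsequences : Prop := ∀ (arr : List Int) (k : Int) (n : Int), Dom_number_of_subsequences arr k n → Spec_number_of_subsequences arr k n (number_of_subsequences arr k n)

-- ===== LEMMAS AND PROOFS =====

-- A's result is the sum of nCr(count, k) over the distinct values of arr.
lemma A_eq_finsetSum (arr : List Int) (k n : Int) :
    number_of_subsequences arr k n
      = ∑ v ∈ arr.toFinset, nCr ((arr.count v : Int)) k := by
  unfold number_of_subsequences
  rw [PySem.Dict.foldl_insert_getD_add_one_eq_counter,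
      PySem.List.foldl_add, PySem.Dict.keys_counter]
  simp only [PySem.Dict.getD_counter, zero_add]
  rw [← List.sum_toFinset _ (PySem.Set.nodup_ofList arr)]
  apply Finset.sum_congr
  · ext v; simp [PySem.Set.mem_ofList]
  · intro v _; rfl

-- the first element left by dropWhile fails the predicate
lemma dropWhile_head_false {α : Type} (p : α → Bool) :
    ∀ (l : List α) (a : α) (rs : List α), l.dropWhile p = a :: rs → p a = false := by
  intro l
  induction l with
  | nil => intro a rs h; simp at h
  | cons b t ih =>
    intro a rs h
    by_cases hb : p b = true
    · rw [List.dropWhile_cons_of_pos hb] at h; exact ih a rs h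
    · rw [List.dropWhile_cons_of_neg hb] at h
      cases h; simpa using hb

-- On a nondecreasing list, walking runs sums nCr(count, k) over distinct values.
lemma goRuns_eq_finsetSum (k : Int) :
    ∀ (l : List Int), l.Pairwise (· ≤ ·) →
      goRuns k l = ∑ v ∈ l.toFinset, nCr ((l.count v : Int)) k := by
  intro l
  induction l using goRuns.induct with
  | case1 => intro _; simp [goRuns]
  | case2 x xs ih =>
    intro hp
    have hxle : ∀ y ∈ xs, x ≤ y := (List.pairwise_cons.mp hp).1
    have hptail : xs.Pairwise (· ≤ ·) := (List.pairwise_cons.mp hp).2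
    set t := xs.takeWhile (fun y => y == x) with ht
    set r := xs.dropWhile (fun y => y == x) with hr
    have hxs : xs = t ++ r := (List.takeWhile_append_dropWhile).symm
    have htx : ∀ y ∈ t, y = x := by
      intro y hy
      have := List.mem_takeWhile_imp hy
      simpa using this
    have hrp : r.Pairwise (· ≤ ·) := by
      rw [hxs] at hptail
      exact (List.pairwise_append.mp hptail).2.1
    have hxr : x ∉ r := by
      intro hxmem
      cases hcr : r with
      | nil => rw [hcr] at hxmem; simp at hxmem
      | cons a rs =>
        have hax : a ≠ x := by
          have := dropWhile_head_false (fun y => y == x) xs a rs (by rw [← hr, hcr])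
          simpa using this
        have hamem : a ∈ xs := by rw [hxs, hcr]; simp
        have hxa : x ≤ a := hxle a hamem
        rw [hcr] at hxmem
        rcases List.mem_cons.mp hxmem with h | h
        · exact hax h.symm
        · have hale : a ≤ x := by
            rw [hcr] at hrp
            exact (List.pairwise_cons.mp hrp).1 x h
          exact hax (le_antisymm hale hxa)
    -- count of x in the whole list is 1 + the run length
    have hcx : (x :: xs).count x = 1 + t.length := by
      have h1 : t.count x = t.length := by
        rw [List.count_eq_length]
        intro y hy; exact (htx y hy) ▸ rfl
      have h2 : r.count x = 0 := List.count_eq_zero.mpr hxr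
      rw [List.count_cons_self, hxs, List.count_append, h1, h2]
      omega
    -- counts of other values are their counts in r
    have hcother : ∀ v, v ≠ x → (x :: xs).count v = r.count v := by
      intro v hv
      have h0 : t.count v = 0 := by
        rw [List.count_eq_zero]
        intro hvmem; exact hv (htx v hvmem)
      rw [hxs]
      simp [List.count_append, h0, Ne.symm hv]
    -- distinct values of the whole list = x plus those of r
    have hset : (x :: xs).toFinset = insert x r.toFinset := by
      ext y
      rw [hxs]
      simp only [List.toFinset_cons, List.toFinset_append, Finset.mem_insert,
        Finset.mem_union, List.mem_toFinset]
      constructor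
      · rintro (h | h | h)
        · exact Or.inl h
        · exact Or.inl (htx y h)
        · exact Or.inr h
      · rintro (h | h)
        · exact Or.inl h
        · exact Or.inr (Or.inr h)
    have hxnr : x ∉ r.toFinset := by simpa [List.mem_toFinset] using hxr
    rw [goRuns, ← hr, ← ht, hset, Finset.sum_insert hxnr, ih hrp]
    congr 1
    · rw [hcx]; push_cast; ring_nf
    · apply Finset.sum_congr rfl
      intro v hv
      have hvx : v ≠ x := by
        intro h; exact hxnr (h ▸ hv)
      rw [hcother v hvx]

-- ===== VERDICT (by name: the statement is the Claim_ definition above) =====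
theorem number_of_subsequences_spec : Claim_equal_number_of_subsequences := by
  intro arr k n _
  unfold Spec_number_of_subsequences number_of_subsequences_alt
  have hperm : (PySem.List.sorted arr (fun x => x) false).Perm arr :=
    PySem.List.sorted_perm arr (fun x => x) false
  rw [A_eq_finsetSum, goRuns_eq_finsetSum k _ (by simpa using PySem.List.sorted_pairwise arr (fun x => x))]
  have hts : arr.toFinset = (PySem.List.sorted arr (fun x => x) false).toFinset := by
    ext v; simp [List.mem_toFinset, hperm.mem_iff]
  rw [hts]
  apply Finset.sum_congr rfl
  intro v _
  rw [hperm.count_eq]
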